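-- pv_equiv track=rewrite | github.com/tharinduangelo/6.009 | labs/lab6/lab.py | no_oversubscribed_sessions
-- ===== SOURCE A (Python) =====
-- def student_possibilities(room, names):
--     """
--     Parameters
--     ----------
--     room: string, name of a room
--     names: a dictionary mapping a student name (string) to a set
--             of room names (strings) that work for that student
--
--     Returns
--     -------
--     list, of variables corresponding to the room and all available students, all with truth value False
--
--     """
--     return [(name + "_" + room, False) for name in names]
--
-- def combinations(n, k):
--     """
--     Produces sublists of a given size, k
--
--     Parameters
--     ----------
--     n : a list of lists
--     k : int, size of sublists needed
--
--     Returns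
--     -------
--     list, containing sublists of given size
--
--     >>> combinations(['a', 'b', 'c', 'd'], 3)
--     [['c', 'b', 'a'], ['d', 'b', 'a'], ['d', 'c', 'a'], ['d', 'c', 'b']]
--     """
--     # base cases
--     if k == 0:
--         return [[]]
--     if len(n) == 0:
--         return []
--     n2 = n[1:] #create copy without first element
--     # get sublists of size k - 1 without first element
--     subcombs = combinations(n2, k - 1)
--     for comb in subcombs:
--         comb.append(n[0])
--     return subcombs + combinations(n2, k) # add sublists of size k that don't have first element
--
-- def no_oversubscribed_sessions(student_preferences, room_capacities):
--     """
--     Parameters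
--     ----------
--     student_preferences : a dictionary mapping a student name (string) to a set
--                          of room names (strings) that work for that student
--     room_capacities : a dictionary mapping each room name to a positive integer
--                      for how many students can fit in that room
--
--     Returns
--     -------
--     res : a cnf formula that ensures that each room capacity isn't exceeded
--
--     >>> student_dict = {'Alice': {'basement', 'penthouse'},
--     ...                 'Bob': {'kitchen'}}
--     >>> rooms = {'basement': 1, 'penthouse': 4}
--     >>> x = convert(no_oversubscribed_sessions(student_dict, rooms))
--     >>> {('Bob_basement', False), ('Alice_basement', False)} in x
--     True
--     >>> {('Bob_penthouse', False), ('Alice_penthouse', False)} in x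
--     False
--     """
--     res = []
--     num_students = sum(1 for student in student_preferences) # get number of students
--     for room in room_capacities:
--         size = room_capacities[room]
--         if size >= num_students: continue
--         possibilities = student_possibilities(room, student_preferences) # variables of all students corresponding to a room
--         res += combinations(possibilities, size + 1) # sublists that ensure size+1 students won't be assigned to a room
--     return res
-- ===== SOURCE B (Python) =====
-- import itertools
--
-- def no_oversubscribed_sessions(student_preferences, room_capacities):
--     num_students = len(student_preferences)
--     res = []
--     for room, size in room_capacities.items():
--         if size >= num_students:
--             continue
--         variables = [(name + "_" + room, False) for name in student_preferences]
--         res.extend(list(reversed(c)) for c in itertools.combinations(variables, size + 1))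
--     return res
-- ===== Notes on version B (the rewrite author's own statement) =====
-- stated objective: idiomatic
-- what changed: Replaces the hand-rolled recursive combinations helper with itertools.combinations enumerating the same (size+1)-subsets iteratively (reversing each tuple to keep A's element order) and computes num_students with len; Pre_ excludes room capacities below -1 (capacities are documented positive), where A's recursive helper silently yields no clauses while itertools.combinations raises ValueError for a negative subset size.
-- outside the precondition, e.g. on no_oversubscribed_sessions({'a': ['r']}, {'r': -2}): A returns [], B raises ValueError
import Mathlib
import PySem

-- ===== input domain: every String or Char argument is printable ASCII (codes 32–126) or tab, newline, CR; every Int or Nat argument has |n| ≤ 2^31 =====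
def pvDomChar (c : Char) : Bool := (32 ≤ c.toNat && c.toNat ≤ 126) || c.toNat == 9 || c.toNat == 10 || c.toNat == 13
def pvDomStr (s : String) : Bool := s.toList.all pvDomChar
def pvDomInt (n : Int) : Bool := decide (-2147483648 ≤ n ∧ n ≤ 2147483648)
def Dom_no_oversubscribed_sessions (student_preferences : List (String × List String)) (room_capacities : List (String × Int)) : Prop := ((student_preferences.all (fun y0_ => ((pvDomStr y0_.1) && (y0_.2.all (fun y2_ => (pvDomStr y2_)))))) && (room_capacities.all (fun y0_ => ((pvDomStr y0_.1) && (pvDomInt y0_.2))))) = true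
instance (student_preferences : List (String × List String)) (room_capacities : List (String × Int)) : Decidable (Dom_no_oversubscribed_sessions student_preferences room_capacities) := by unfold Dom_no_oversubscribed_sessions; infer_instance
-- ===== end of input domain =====

-- B replaces A's hand-rolled recursive combinations helper with the library
-- (itertools-style) lexicographic k-subset enumeration, reversing each tuple
-- to keep A's element order; objective: idiomatic.

-- ===== PORT A =====
-- A-side helper: student_possibilities(room, names)
def pvStudentPossibilities (room : String) (names : List (String × List String)) : List (String × Bool) :=
  names.map (fun p => (p.1 ++ "_" ++ room, false))

-- A-side helper: the recursive combinations(n, k); Python mutates each sublist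
-- with comb.append(n[0]), ported as mapping (· ++ [n[0]]) over the recursive result
def pvCombA (n : List (String × Bool)) (k : Int) : List (List (String × Bool)) :=
  if k = 0 then [[]]
  else
    match n with
    | [] => []
    | x :: n2 => ((pvCombA n2 (k - 1)).map (fun c => c ++ [x])) ++ pvCombA n2 k

def no_oversubscribed_sessions (student_preferences : List (String × List String)) (room_capacities : List (String × Int)) : List (List (String × Bool)) :=
  let num_students : Int := (student_preferences.map (fun _ => (1 : Int))).sum
  room_capacities.foldl
    (fun res p =>
      let room := p.1
      let size := p.2
      if size ≥ num_students then res
      else res ++ pvCombA (pvStudentPossibilities room student_preferences) (size + 1))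
    []

-- ===== PORT B =====
def no_oversubscribed_sessions_alt (student_preferences : List (String × List String)) (room_capacities : List (String × Int)) : List (List (String × Bool)) :=
  let num_students : Int := student_preferences.length
  room_capacities.foldl
    (fun res p =>
      if p.2 ≥ num_students then res
      else
        let vs := student_preferences.map (fun q => (q.1 ++ "_" ++ p.1, false))
        res ++ (PySem.List.combinations vs (p.2 + 1).toNat).map List.reverse)
    []

-- ===== PRECONDITION & SPEC =====
-- Pre_ excludes room capacities below -1 (capacities are documented positive) on
-- rooms that would produce clauses: there A's recursive helper silently yields no
-- clauses while B's itertools.combinations raises ValueError on a negative size.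
def Pre_no_oversubscribed_sessions (student_preferences : List (String × List String)) (room_capacities : List (String × Int)) : Prop :=
  ∀ p ∈ room_capacities, (student_preferences.length : Int) ≤ p.2 ∨ -1 ≤ p.2
instance (student_preferences : List (String × List String)) (room_capacities : List (String × Int)) : Decidable (Pre_no_oversubscribed_sessions student_preferences room_capacities) := by unfold Pre_no_oversubscribed_sessions; infer_instance

def pvWitness_no_oversubscribed_sessions : (List (String × List String)) × (List (String × Int)) :=
  ([("Alice", ["basement"]), ("Bob", ["kitchen"])], [("basement", 1), ("penthouse", 4)])

def Spec_no_oversubscribed_sessions (student_preferences : List (String × List String)) (room_capacities : List (String × Int)) (out : List (List (String × Bool))) : Prop := out = no_oversubscribed_sessions_alt student_preferences room_capacities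
instance (student_preferences : List (String × List String)) (room_capacities : List (String × Int)) (out : List (List (String × Bool))) : Decidable (Spec_no_oversubscribed_sessions student_preferences room_capacities out) := by unfold Spec_no_oversubscribed_sessions; infer_instance

-- ===== CLAIM (what is proved, stated in full; the proofs are below) =====
def Claim_equal_no_oversubscribed_sessions : Prop := ∀ (student_preferences : List (String × List String)) (room_capacities : List (String × Int)), Dom_no_oversubscribed_sessions student_preferences room_capacities → Pre_no_oversubscribed_sessions student_preferences room_capacities → Spec_no_oversubscribed_sessions student_preferences room_capacities (no_oversubscribed_sessions student_preferences room_capacities)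

-- ===== LEMMAS AND PROOFS =====

-- A's recursive helper is the reversed lexicographic k-subset enumeration
theorem pvCombA_eq (n : List (String × Bool)) (r : Nat) :
    pvCombA n (r : Int) = (PySem.List.combinations n r).map List.reverse := by
  induction n generalizing r with
  | nil =>
      cases r with
      | zero => simp [pvCombA, PySem.List.combinations_zero]
      | succ r =>
          unfold pvCombA
          simp [PySem.List.combinations_nil_succ, Nat.cast_succ,
            show ((r : Int) + 1) ≠ 0 by omega]
  | cons x n2 ih =>
      cases r with
      | zero => simp [pvCombA, PySem.List.combinations_zero]
      | succ r =>
          unfold pvCombA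
          have ih2 : pvCombA n2 ((r : Int) + 1)
              = (PySem.List.combinations n2 (r + 1)).map List.reverse := by
            have h := ih (r + 1); push_cast at h; exact h
          simp only [Nat.cast_succ, show ¬ ((r : Int) + 1 = 0) by omega, if_false,
            show ((r : Int) + 1) - 1 = (r : Int) by ring, ih r, ih2,
            PySem.List.combinations_cons_succ, List.map_append, List.map_map]
          congr 1
          simp [Function.comp_def]

theorem no_oversubscribed_sessions_step (student_preferences : List (String × List String))
    (room_capacities : List (String × Int))
    (hpre : Pre_no_oversubscribed_sessions student_preferences room_capacities) :
    no_oversubscribed_sessions student_preferences room_capacities =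
      no_oversubscribed_sessions_alt student_preferences room_capacities := by
  unfold no_oversubscribed_sessions no_oversubscribed_sessions_alt
  have hn : ((student_preferences.map (fun _ => (1 : Int))).sum : Int)
      = (student_preferences.length : Int) := by simp
  rw [hn]
  show List.foldl
      (fun res p =>
        if p.2 ≥ (student_preferences.length : Int) then res
        else res ++ pvCombA (pvStudentPossibilities p.1 student_preferences) (p.2 + 1))
      [] room_capacities
    = List.foldl
      (fun res p =>
        if p.2 ≥ (student_preferences.length : Int) then res
        else res ++ (PySem.List.combinations
            (student_preferences.map (fun q => (q.1 ++ "_" ++ p.1, false))) (p.2 + 1).toNat).map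
          List.reverse)
      [] room_capacities
  refine PySem.List.foldl_congr_mem _ _ _ _ (fun res p hp => ?_)
  by_cases h1 : p.2 ≥ (student_preferences.length : Int)
  · simp [h1]
  · have h2 : -1 ≤ p.2 := (hpre p hp).resolve_left (by omega)
    have hr : p.2 + 1 = ((p.2 + 1).toNat : Int) := by omega
    simp only [ge_iff_le, h1, if_false]
    rw [hr, pvCombA_eq]
    rfl

-- ===== VERDICT (by name: the statement is the Claim_ definition above) =====
theorem no_oversubscribed_sessions_spec : Claim_equal_no_oversubscribed_sessions := by
  intro sp rc _ hpre
  unfold Spec_no_oversubscribed_sessions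
  exact no_oversubscribed_sessions_step sp rc hpre
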